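-- pv_equiv track=rewrite | github.com/theopeneyes/project-astra | llm_server/segregator/segregation.py | segregator
-- ===== SOURCE A (Python) =====
-- from typing import Dict, List
--
-- def segregator(final_json: List) -> List[Dict]:
--     topics: Dict[str, str] = {}
--     concepts: Dict[str, str] = {}
--     headings: Dict[str, str] = {}
--
--     for _, js_object in enumerate(final_json):
--         if "topic" in js_object.keys():
--             topic_text = topics.get(js_object["topic"], "")
--             topics[js_object["topic"]] = topic_text + js_object["text"]
--
--         if "heading_text" in js_object.keys():
--             heading_text = headings.get(js_object["heading_text"], "")
--             headings[js_object["heading_text"]] = heading_text + js_object["text"]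
--
--         if "concept" in js_object.keys():
--             concept_text = concepts.get(js_object["concept"], "")
--             concepts[js_object["concept"] ]= concept_text + js_object["text"]
--
--     return [
--         topics,
--         concepts,
--         headings,
--     ]
-- ===== SOURCE B (Python) =====
-- from typing import Dict, List
--
-- def segregator(final_json: List) -> List[Dict]:
--     def aggregate(key: str) -> Dict[str, str]:
--         d: Dict[str, str] = {}
--         for o in final_json:
--             if key in o.keys():
--                 d[o[key]] = d.get(o[key], "") + o["text"]
--         return d
--     return [aggregate("topic"), aggregate("concept"), aggregate("heading_text")]
-- ===== Notes on version B (the rewrite author's own statement) =====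
-- stated objective: simpler
-- what changed: One interleaved pass maintaining three dicts is replaced by a single aggregate(key) helper run in three independent focused scans, one per key.
import Mathlib
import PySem

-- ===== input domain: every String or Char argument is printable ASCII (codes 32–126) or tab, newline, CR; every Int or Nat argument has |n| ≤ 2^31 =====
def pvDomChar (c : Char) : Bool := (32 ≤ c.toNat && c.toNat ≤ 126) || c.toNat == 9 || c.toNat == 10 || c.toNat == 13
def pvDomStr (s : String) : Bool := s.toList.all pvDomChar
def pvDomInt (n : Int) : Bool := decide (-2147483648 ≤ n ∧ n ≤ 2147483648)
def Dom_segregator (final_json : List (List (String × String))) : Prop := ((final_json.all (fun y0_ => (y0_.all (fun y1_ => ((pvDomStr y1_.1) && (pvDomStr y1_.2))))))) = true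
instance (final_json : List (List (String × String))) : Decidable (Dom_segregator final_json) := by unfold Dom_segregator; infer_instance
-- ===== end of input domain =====

-- B replaces A's single interleaved pass over three dicts by one aggregate(key)
-- helper run as three independent focused scans (objective: simpler).

-- ===== PORT A =====
-- A: one pass, updating topics / headings / concepts in that order per object.
-- (js_object["text"] is ported as getD "" — Pre_ guarantees the key is present.)
def segregator (final_json : List (List (String × String))) : List (List (String × String)) :=
  let st := final_json.foldl
    (fun (st : PySem.Dict String String × PySem.Dict String String × PySem.Dict String String) o =>
      let od := PySem.Dict.mk o
      let topics := st.1
      let concepts := st.2.1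
      let headings := st.2.2
      let topics :=
        if od.contains "topic" then
          let topic_text := topics.getD (od.getD "topic" "") ""
          topics.insert (od.getD "topic" "") (topic_text ++ od.getD "text" "")
        else topics
      let headings :=
        if od.contains "heading_text" then
          let heading_text := headings.getD (od.getD "heading_text" "") ""
          headings.insert (od.getD "heading_text" "") (heading_text ++ od.getD "text" "")
        else headings
      let concepts :=
        if od.contains "concept" then
          let concept_text := concepts.getD (od.getD "concept" "") ""
          concepts.insert (od.getD "concept" "") (concept_text ++ od.getD "text" "")
        else concepts
      (topics, concepts, headings))
    (PySem.Dict.empty, PySem.Dict.empty, PySem.Dict.empty)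
  [st.1.items, st.2.1.items, st.2.2.items]

-- ===== PORT B =====
-- B's helper aggregate(key): one focused scan maintaining a single dict.
def segAggregate (key : String) (final_json : List (List (String × String))) : PySem.Dict String String :=
  final_json.foldl
    (fun d o =>
      let od := PySem.Dict.mk o
      if od.contains key then
        d.insert (od.getD key "") (d.getD (od.getD key "") "" ++ od.getD "text" "")
      else d)
    PySem.Dict.empty

def segregator_alt (final_json : List (List (String × String))) : List (List (String × String)) :=
  [(segAggregate "topic" final_json).items,
   (segAggregate "concept" final_json).items,
   (segAggregate "heading_text" final_json).items]

-- ===== PRECONDITION & SPEC =====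
-- Pre_ excludes exactly the inputs where Python A raises KeyError('text'): an object
-- carrying a "topic"/"heading_text"/"concept" key but no "text" key.
def Pre_segregator (final_json : List (List (String × String))) : Prop :=
  (final_json.all (fun o =>
    !(o.any (fun p => p.1 == "topic") || o.any (fun p => p.1 == "heading_text") ||
      o.any (fun p => p.1 == "concept")) || o.any (fun p => p.1 == "text"))) = true
instance (final_json : List (List (String × String))) : Decidable (Pre_segregator final_json) := by unfold Pre_segregator; infer_instance

def pvWitness_segregator : (List (List (String × String))) :=
  [[("topic", "t1"), ("text", "a")], [("concept", "c1"), ("heading_text", "h1"), ("text", "b")], [("other", "z")]]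

def Spec_segregator (final_json : List (List (String × String))) (out : List (List (String × String))) : Prop := out = segregator_alt final_json
instance (final_json : List (List (String × String))) (out : List (List (String × String))) : Decidable (Spec_segregator final_json out) := by unfold Spec_segregator; infer_instance

-- ===== CLAIM (what is proved, stated in full; the proofs are below) =====
def Claim_equal_segregator : Prop := ∀ (final_json : List (List (String × String))), Dom_segregator final_json → Pre_segregator final_json → Spec_segregator final_json (segregator final_json)

-- ===== LEMMAS AND PROOFS =====

-- the per-object update of B's single-dict scan
def segStep (key : String) (d : PySem.Dict String String) (o : List (String × String)) : PySem.Dict String String :=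
  let od := PySem.Dict.mk o
  if od.contains key then
    d.insert (od.getD key "") (d.getD (od.getD key "") "" ++ od.getD "text" "")
  else d

-- A's combined pass is the triple of B's three independent scans.
theorem seg_fold_split (l : List (List (String × String)))
    (t c h : PySem.Dict String String) :
    l.foldl
      (fun (st : PySem.Dict String String × PySem.Dict String String × PySem.Dict String String) o =>
        let od := PySem.Dict.mk o
        let topics := st.1
        let concepts := st.2.1
        let headings := st.2.2
        let topics :=
          if od.contains "topic" then
            let topic_text := topics.getD (od.getD "topic" "") ""
            topics.insert (od.getD "topic" "") (topic_text ++ od.getD "text" "")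
          else topics
        let headings :=
          if od.contains "heading_text" then
            let heading_text := headings.getD (od.getD "heading_text" "") ""
            headings.insert (od.getD "heading_text" "") (heading_text ++ od.getD "text" "")
          else headings
        let concepts :=
          if od.contains "concept" then
            let concept_text := concepts.getD (od.getD "concept" "") ""
            concepts.insert (od.getD "concept" "") (concept_text ++ od.getD "text" "")
          else concepts
        (topics, concepts, headings))
      (t, c, h)
    = (l.foldl (segStep "topic") t, l.foldl (segStep "concept") c, l.foldl (segStep "heading_text") h) := by
  induction l generalizing t c h with
  | nil => rfl
  | cons x xs ih =>
      simp only [List.foldl_cons]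
      exact ih _ _ _

-- ===== VERDICT (by name: the statement is the Claim_ definition above) =====
theorem segregator_spec : Claim_equal_segregator := by
  intro final_json _ _
  unfold Spec_segregator segregator segregator_alt segAggregate
  rw [seg_fold_split]
  rfl
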